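-- pv_equiv track=rewrite | github.com/vyshnavrajc1/abuse-engine | engine/agents/sequence_agent.py | _is_sequential
-- ===== SOURCE A (Python) =====
-- from typing import Dict, List, Optional, Tuple
--
-- def _is_sequential(nums: List[int], max_step: int = 2, min_run: int = 10) -> bool:
--     """Return True if at least min_run consecutive numbers differ by <= max_step
--     AND are in the port scan range (1–10000).
--     Higher threshold (10 vs 5) prevents near-sequential source-port FPs on benign traffic."""
--     if len(nums) < min_run:
--         return False
--     # Filter to well-known port range to avoid ephemeral port FPs
--     nums = [n for n in nums if 1 <= n <= 10000]
--     if len(nums) < min_run: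
--         return False
--     consecutive = 1
--     for i in range(1, len(nums)):
--         if 1 <= abs(nums[i] - nums[i - 1]) <= max_step:
--             consecutive += 1
--             if consecutive >= min_run:
--                 return True
--         else:
--             consecutive = 1
--     return False
-- ===== SOURCE B (Python) =====
-- from typing import Dict, List, Optional, Tuple
--
-- def _is_sequential(nums: List[int], max_step: int = 2, min_run: int = 10) -> bool:
--     """Break-position formulation: after the same range filter, a run of min_run
--     near-sequential numbers is a gap of >= min_run-1 between consecutive
--     'break' positions (adjacent pairs whose diff is 0 or > max_step)."""
--     if len(nums) < min_run:
--         return False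
--     nums = [n for n in nums if 1 <= n <= 10000]
--     if len(nums) < min_run:
--         return False
--     flags = [1 <= abs(y - x) <= max_step for x, y in zip(nums, nums[1:])]
--     breaks = [-1] + [i for i, f in enumerate(flags) if not f] + [len(flags)]
--     need = max(min_run - 1, 1)
--     return any(b - a - 1 >= need for a, b in zip(breaks, breaks[1:]))
-- ===== Notes on version B (the rewrite author's own statement) =====
-- stated objective: alternative
-- what changed: Replaces A's stateful running-counter scan with a two-stage break-position formulation: compute the adjacency flags, collect the indices of 'break' pairs via enumerate, and test whether any gap between consecutive break positions (padded with -1 and len) reaches min_run-1.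
import Mathlib
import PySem

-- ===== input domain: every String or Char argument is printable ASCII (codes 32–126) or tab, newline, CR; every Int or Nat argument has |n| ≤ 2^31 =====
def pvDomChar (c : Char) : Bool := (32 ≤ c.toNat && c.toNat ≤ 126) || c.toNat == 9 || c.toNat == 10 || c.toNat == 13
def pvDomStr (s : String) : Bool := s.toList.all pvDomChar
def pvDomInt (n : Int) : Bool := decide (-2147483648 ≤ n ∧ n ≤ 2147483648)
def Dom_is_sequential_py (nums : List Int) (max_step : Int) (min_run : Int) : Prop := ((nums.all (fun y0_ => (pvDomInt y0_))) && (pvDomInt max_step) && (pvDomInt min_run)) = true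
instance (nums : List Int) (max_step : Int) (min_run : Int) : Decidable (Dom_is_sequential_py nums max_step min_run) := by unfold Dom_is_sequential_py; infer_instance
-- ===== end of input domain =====

-- B re-derives A's running-counter scan as a break-position/gap computation (different
-- decomposition, same O(n) cost); equivalence of the two is proved for all inputs.

-- ===== PORT A =====
-- the 'for i in range(1, len(nums))' loop with its early return and the running counter
def pvALoop (nums : List Int) (max_step : Int) (min_run : Int) : List Int → Int → Bool
  | [], _ => false
  | i :: is, consecutive =>
      let d := PySem.List.pyGetD nums i 0 - PySem.List.pyGetD nums (i - 1) 0   -- indices from range(1, len) are always in range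
      if 1 ≤ |d| ∧ |d| ≤ max_step then
        let consecutive := consecutive + 1
        if min_run ≤ consecutive then true
        else pvALoop nums max_step min_run is consecutive
      else pvALoop nums max_step min_run is 1

def is_sequential_py (nums : List Int) (max_step : Int) (min_run : Int) : Bool :=
  if (nums.length : Int) < min_run then false
  else
    let nums2 := nums.filter (fun n => decide (1 ≤ n ∧ n ≤ 10000))
    if (nums2.length : Int) < min_run then false
    else pvALoop nums2 max_step min_run (PySem.List.pyRange 1 (nums2.length : Int) 1) 1

-- ===== PORT B =====
def is_sequential_py_alt (nums : List Int) (max_step : Int) (min_run : Int) : Bool :=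
  if (nums.length : Int) < min_run then false
  else
    let nums2 := nums.filter (fun n => decide (1 ≤ n ∧ n ≤ 10000))
    if (nums2.length : Int) < min_run then false
    else
      let flags := (nums2.zip (nums2.drop 1)).map
        (fun p => decide (1 ≤ |p.2 - p.1| ∧ |p.2 - p.1| ≤ max_step))
      let breaks := [(-1 : Int)] ++
        ((PySem.List.enumerate flags).filter (fun p => !p.2)).map (fun p => p.1) ++
        [(flags.length : Int)]
      let need := max (min_run - 1) 1
      (breaks.zip (breaks.drop 1)).any (fun p => decide (need ≤ p.2 - p.1 - 1))

-- ===== PRECONDITION & SPEC =====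
def Spec_is_sequential_py (nums : List Int) (max_step : Int) (min_run : Int) (out : Bool) : Prop := out = is_sequential_py_alt nums max_step min_run
instance (nums : List Int) (max_step : Int) (min_run : Int) (out : Bool) : Decidable (Spec_is_sequential_py nums max_step min_run out) := by unfold Spec_is_sequential_py; infer_instance

-- ===== CLAIM (what is proved, stated in full; the proofs are below) =====
def Claim_equal_is_sequential_py : Prop := ∀ (nums : List Int) (max_step : Int) (min_run : Int), Dom_is_sequential_py nums max_step min_run → Spec_is_sequential_py nums max_step min_run (is_sequential_py nums max_step min_run)

-- ===== LEMMAS AND PROOFS =====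

-- the adjacency flags both programs are really about
def pvFlags (max_step : Int) (l : List Int) : List Bool :=
  (l.zip (l.drop 1)).map (fun p => decide (1 ≤ |p.2 - p.1| ∧ |p.2 - p.1| ≤ max_step))

-- length of the leading run of true flags
def pvLead : List Bool → Nat
  | [] => 0
  | false :: _ => 0
  | true :: fs => pvLead fs + 1

-- the suffix after the first false flag (everything after the first run)
def pvDropRun : List Bool → List Bool
  | [] => []
  | false :: fs => fs
  | true :: fs => pvDropRun fs

-- longest run of true flags (max over suffixes of the leading run)
def pvLongest : List Bool → Nat
  | [] => 0
  | f :: fs => max (pvLead (f :: fs)) (pvLongest fs)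

-- break positions of a flags list, as B's enumerate/filter produces them
def pvBrk : List Bool → List Int
  | [] => []
  | f :: fs => if f then (pvBrk fs).map (· + 1) else 0 :: (pvBrk fs).map (· + 1)

def pvGapsAny (need : Int) (bs : List Int) : Bool :=
  (bs.zip (bs.drop 1)).any (fun p => decide (need ≤ p.2 - p.1 - 1))

lemma pvDropRun_length_le (fl : List Bool) : (pvDropRun fl).length ≤ fl.length := by
  induction fl with
  | nil => simp [pvDropRun]
  | cons f fs ih => cases f <;> simp [pvDropRun]
                    omega

lemma pvDropRun_length_lt (f : Bool) (fs : List Bool) :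
    (pvDropRun (f :: fs)).length < (f :: fs).length := by
  cases f
  · simp [pvDropRun]
  · simp only [pvDropRun, List.length_cons]
    exact Nat.lt_succ_of_le (pvDropRun_length_le fs)

lemma pvLongest_eq (fl : List Bool) :
    pvLongest fl = max (pvLead fl) (pvLongest (pvDropRun fl)) := by
  induction fl with
  | nil => simp [pvLongest, pvLead, pvDropRun]
  | cons f fs ih =>
      cases f
      · simp [pvLongest, pvLead, pvDropRun]
      · simp only [pvLongest, pvLead, pvDropRun]
        rw [ih]
        omega

-- characterisation of A's counter loop over abstract flags
def pvAuxF (min_run : Int) : List Bool → Int → Bool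
  | [], _ => false
  | f :: fs, c =>
      if f then
        if min_run ≤ c + 1 then true else pvAuxF min_run fs (c + 1)
      else pvAuxF min_run fs 1

lemma pvAuxF_step (mr : Int) (fl : List Bool) :
    ∀ c : Int, (pvAuxF mr fl c = true ↔
      ((mr ≤ c + (pvLead fl : Int) ∧ 1 ≤ pvLead fl) ∨ pvAuxF mr (pvDropRun fl) 1 = true)) := by
  induction fl with
  | nil => intro c; simp [pvAuxF, pvLead, pvDropRun]
  | cons f fs ih =>
      intro c
      cases f
      · simp [pvAuxF, pvLead, pvDropRun]
      · by_cases h : mr ≤ c + 1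
        · simp only [pvAuxF, pvLead, pvDropRun]
          simp only [h, if_true]
          constructor
          · intro _
            exact Or.inl ⟨by push_cast; omega, by omega⟩
          · intro _
            trivial
        · simp only [pvAuxF, pvLead, pvDropRun, if_neg h, if_true]
          rw [ih (c + 1)]
          by_cases hp : pvAuxF mr (pvDropRun fs) 1 = true <;> simp [hp] <;> omega

lemma pvAuxF_longest (mr : Int) (fl : List Bool) :
    pvAuxF mr fl 1 = true ↔ max (mr - 1) 1 ≤ (pvLongest fl : Int) := by
  induction hn : fl.length using Nat.strong_induction_on generalizing fl with
  | _ n ih =>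
    cases fl with
    | nil =>
        simp [pvAuxF, pvLongest]
    | cons f fs =>
        rw [pvAuxF_step mr (f :: fs) 1,
          ih (pvDropRun (f :: fs)).length (by rw [← hn]; exact pvDropRun_length_lt f fs) _ rfl,
          pvLongest_eq (f :: fs)]
        rw [Nat.cast_max, le_max_iff]
        constructor
        · rintro (⟨h1, h2⟩ | h1)
          · left; omega
          · right; exact h1
        · rintro (h1 | h1)
          · left; constructor <;> omega
          · right; exact h1

-- B's enumerate/filter/map break-index expression is pvBrk, shifted by the start
lemma pvEnum_brk (fl : List Bool) :
    ∀ s : Int, ((PySem.List.enumerate fl s).filter (fun p => !p.2)).map (fun p => p.1)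
      = (pvBrk fl).map (· + s) := by
  induction fl with
  | nil => intro s; simp [PySem.List.enumerate_nil, pvBrk]
  | cons f fs ih =>
      intro s
      rw [PySem.List.enumerate_cons]
      cases f
      · rw [show pvBrk (false :: fs) = 0 :: (pvBrk fs).map (· + 1) from rfl]
        simp only [List.filter_cons, Bool.not_false, if_true, List.map_cons, ih (s + 1),
          List.map_map]
        congr 1
        · omega
        · apply List.map_congr_left; intro x _; simp; omega
      · rw [show pvBrk (true :: fs) = (pvBrk fs).map (· + 1) from rfl]
        simp only [List.filter_cons, Bool.not_true, Bool.false_eq_true, if_false, ih (s + 1),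
          List.map_map]
        apply List.map_congr_left; intro x _; simp; omega

lemma pvGapsAny_shift (need k : Int) (bs : List Int) :
    pvGapsAny need (bs.map (· + k)) = pvGapsAny need bs := by
  unfold pvGapsAny
  rw [← List.map_drop, List.zip_map, List.any_map]
  refine congrArg _ (funext fun p => ?_)
  simp only [Function.comp, Prod.map_fst, Prod.map_snd]
  rw [decide_eq_decide]
  omega

lemma pvGapsAny_cons₂ (need a b : Int) (rest : List Int) :
    pvGapsAny need (a :: b :: rest) = (decide (need ≤ b - a - 1) || pvGapsAny need (b :: rest)) := rfl

lemma pvGapsAny_pair (need a b : Int) : pvGapsAny need [a, b] = decide (need ≤ b - a - 1) := by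
  simp [pvGapsAny]

lemma pvGapsAny_brk (need : Int) (hneed : 1 ≤ need) (fl : List Bool) :
    ∀ c : Int, 0 ≤ c →
      (pvGapsAny need ((-1 - c) :: pvBrk fl ++ [(fl.length : Int)]) = true ↔
        (need ≤ c + (pvLead fl : Int) ∨ need ≤ (pvLongest (pvDropRun fl) : Int))) := by
  induction fl with
  | nil =>
      intro c hc
      rw [show ((-1 - c) :: pvBrk [] ++ [(([] : List Bool).length : Int)]) = [-1 - c, 0] by
        simp [pvBrk]]
      rw [pvGapsAny_pair]
      simp [pvLead, pvDropRun, pvLongest]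
      omega
  | cons f fs ih =>
      intro c hc
      cases f
      · rw [show ((-1 - c) :: pvBrk (false :: fs) ++ [((false :: fs).length : Int)])
              = (-1 - c) :: 0 :: ((pvBrk fs).map (· + 1) ++ [((fs.length : Int) + 1)]) by
            simp [pvBrk]]
        rw [pvGapsAny_cons₂]
        rw [show (0 : Int) :: ((pvBrk fs).map (· + 1) ++ [((fs.length : Int) + 1)])
              = (((-1 - 0) :: (pvBrk fs ++ [(fs.length : Int)])).map (· + 1)) by simp]
        rw [pvGapsAny_shift]
        rw [show ((-1 - 0) :: (pvBrk fs ++ [(fs.length : Int)]))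
              = ((-1 - 0) :: pvBrk fs ++ [(fs.length : Int)]) by simp]
        simp only [Bool.or_eq_true, decide_eq_true_iff]
        rw [ih 0 le_rfl]
        rw [show pvLead (false :: fs) = 0 from rfl, show pvDropRun (false :: fs) = fs from rfl]
        rw [pvLongest_eq fs, Nat.cast_max, le_max_iff]
        omega
      · rw [show ((-1 - c) :: pvBrk (true :: fs) ++ [((true :: fs).length : Int)])
              = (((-1 - (c + 1)) :: pvBrk fs ++ [(fs.length : Int)]).map (· + 1)) by
            simp [pvBrk]; omega]
        rw [pvGapsAny_shift]
        rw [ih (c + 1) (by omega)]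
        rw [show pvLead (true :: fs) = pvLead fs + 1 from rfl,
          show pvDropRun (true :: fs) = pvDropRun fs from rfl]
        push_cast
        omega

lemma pvFlags_length (ms : Int) (l : List Int) :
    (pvFlags ms l).length = min l.length (l.length - 1) := by
  simp [pvFlags]

lemma pvFlags_drop_cons (ms : Int) (l : List Int) (j : Nat) (h : j + 1 < l.length) :
    (pvFlags ms l).drop j
      = decide (1 ≤ |l.getD (j + 1) 0 - l.getD j 0| ∧ |l.getD (j + 1) 0 - l.getD j 0| ≤ ms)
        :: (pvFlags ms l).drop (j + 1) := by
  have hjf : j < (pvFlags ms l).length := by rw [pvFlags_length]; omega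
  rw [List.drop_eq_getElem_cons hjf]
  congr 1
  rw [List.getD_eq_getElem l 0 (by omega : j + 1 < l.length),
    List.getD_eq_getElem l 0 (by omega : j < l.length)]
  simp [pvFlags]

lemma pvBridgeA (nums : List Int) (ms mr : Int) :
    ∀ (n j : Nat) (c : Int), nums.length - j ≤ n →
      pvALoop nums ms mr (PySem.List.pyRange ((j : Int) + 1) (nums.length : Int) 1) c
        = pvAuxF mr ((pvFlags ms nums).drop j) c := by
  intro n
  induction n with
  | zero =>
      intro j c h
      rw [PySem.List.pyRange_one_eq_nil (by omega)]
      rw [List.drop_eq_nil_of_le (by rw [pvFlags_length]; omega)]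
      rfl
  | succ n ih =>
      intro j c h
      by_cases hj : j + 1 < nums.length
      · rw [PySem.List.pyRange_one_cons (by omega : ((j : Int) + 1) < (nums.length : Int))]
        rw [pvFlags_drop_cons ms nums j hj]
        have g1 : PySem.List.pyGetD nums ((j : Int) + 1) 0 = nums.getD (j + 1) 0 := by
          rw [show ((j : Int) + 1) = ((j + 1 : Nat) : Int) by push_cast; ring,
            PySem.List.pyGetD_natCast]
        have g2 : PySem.List.pyGetD nums ((j : Int) + 1 - 1) 0 = nums.getD j 0 := by
          rw [show ((j : Int) + 1 - 1) = ((j : Nat) : Int) by ring,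
            PySem.List.pyGetD_natCast]
        simp only [pvALoop, pvAuxF, g1, g2]
        have ih1 := ih (j + 1) (c + 1) (by omega)
        have ih2 := ih (j + 1) 1 (by omega)
        push_cast at ih1 ih2
        by_cases hP : 1 ≤ |nums.getD (j + 1) 0 - nums.getD j 0| ∧
            |nums.getD (j + 1) 0 - nums.getD j 0| ≤ ms
        · simp only [hP, decide_eq_true_eq]
          by_cases hm : mr ≤ c + 1
          · simp [hm]
          · simp only [hm, if_false]
            simpa using ih1
        · simp only [hP, if_false, decide_false]
          simpa using ih2
      · rw [PySem.List.pyRange_one_eq_nil (by omega)]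
        rw [List.drop_eq_nil_of_le (by rw [pvFlags_length]; omega)]
        rfl

-- ===== VERDICT (by name: the statement is the Claim_ definition above) =====
theorem is_sequential_py_spec : Claim_equal_is_sequential_py := by
  intro nums ms mr _
  unfold Spec_is_sequential_py
  unfold is_sequential_py is_sequential_py_alt
  by_cases h1 : (nums.length : Int) < mr
  · simp [h1]
  · simp only [h1, if_false]
    set l := nums.filter (fun n => decide (1 ≤ n ∧ n ≤ 10000)) with hl
    by_cases h2 : (l.length : Int) < mr
    · simp [h2]
    · simp only [h2, if_false]
      rw [Bool.eq_iff_iff]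
      have hA := pvBridgeA l ms mr l.length 0 1 (by omega)
      simp only [Nat.cast_zero, zero_add, List.drop_zero] at hA
      rw [hA, pvAuxF_longest]
      have hB := pvEnum_brk (pvFlags ms l) 0
      simp only [add_zero, List.map_id'] at hB
      rw [show (List.map (fun p => decide (1 ≤ |p.2 - p.1| ∧ |p.2 - p.1| ≤ ms))
            (l.zip (List.drop 1 l))) = pvFlags ms l from rfl]
      rw [hB]
      rw [show ([(-1 : Int)] ++ pvBrk (pvFlags ms l) ++ [((pvFlags ms l).length : Int)])
            = ((-1 - 0) :: pvBrk (pvFlags ms l) ++ [((pvFlags ms l).length : Int)]) by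
          norm_num]
      rw [show ∀ bs : List Int,
            ((bs.zip (List.drop 1 bs)).any fun p => decide (max (mr - 1) 1 ≤ p.2 - p.1 - 1))
              = pvGapsAny (max (mr - 1) 1) bs from fun _ => rfl]
      rw [pvGapsAny_brk (max (mr - 1) 1) (le_max_right _ _) (pvFlags ms l) 0 le_rfl]
      rw [pvLongest_eq (pvFlags ms l), Nat.cast_max, le_max_iff]
      omega
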